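-- pv_equiv track=rewrite | github.com/guystern26/Query-Tester | packages/query-tester/stage/bin/spl/spl_normalizer.py | normalize_spl
-- ===== SOURCE A (Python) =====
-- def normalize_spl(spl):
--     # type: (Optional[str]) -> str
--     """
--     Normalize an SPL string for safe processing.
--
--     - Returns empty string for None or empty input
--     - Converts Windows line endings (\\r\\n) to \\n
--     - Strips leading/trailing whitespace
--     - Collapses runs of spaces/tabs within a line to single space
--     - Does NOT modify content inside quoted strings
--     - Preserves meaningful newlines in multiline SPL
--     """
--     if not spl:
--         return ""
--
--     # Windows line endings → Unix
--     result = spl.replace("\r\n", "\n").replace("\r", "\n")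
--
--     # Strip leading/trailing whitespace from the whole string
--     result = result.strip()
--
--     if not result:
--         return ""
--
--     # Normalize internal whitespace line-by-line, preserving quoted content
--     lines = result.split("\n")
--     normalized_lines = []  # type: list
--     for line in lines:
--         normalized_lines.append(_normalize_line_whitespace(line))
--
--     return "\n".join(normalized_lines)
--
-- def _normalize_line_whitespace(line):
--     # type: (str) -> str
--     """
--     Collapse multiple spaces/tabs to single space within a line,
--     but skip content inside single or double quotes.
--     """
--     result = []  # type: list
--     i = 0
--     in_space = False
--
--     while i < len(line):
--         ch = line[i]
--
--         # Handle quoted strings — pass through verbatim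
--         if ch in ('"', "'"):
--             if in_space:
--                 result.append(" ")
--                 in_space = False
--             quote_char = ch
--             result.append(ch)
--             i += 1
--             while i < len(line):
--                 c = line[i]
--                 result.append(c)
--                 if c == "\\" and i + 1 < len(line):
--                     # Escaped character — include next char too
--                     i += 1
--                     result.append(line[i])
--                 elif c == quote_char:
--                     break
--                 i += 1
--             i += 1
--             continue
--
--         # Collapse whitespace (spaces and tabs)
--         if ch in (" ", "\t"):
--             in_space = True
--             i += 1
--             continue
--
--         if in_space:
--             result.append(" ")
--             in_space = False
--
--         result.append(ch)
--         i += 1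
--
--     return "".join(result)
-- ===== SOURCE B (Python) =====
-- def normalize_spl(spl):
--     # type: (Optional[str]) -> str
--     """Segment-based SPL whitespace normalizer (same behaviour as the scanner version)."""
--     if not spl:
--         return ""
--     text = spl.replace("\r\n", "\n").replace("\r", "\n").strip()
--     if not text:
--         return ""
--     return "\n".join(_normalize_line(line) for line in text.split("\n"))
--
--
-- def _segments(line):
--     """Split a line into alternating (False, unquoted) / (True, quoted-verbatim) segments."""
--     segs = []
--     rest = line
--     while rest:
--         n = len(rest)
--         j = 0
--         while j < n and rest[j] not in ('"', "'"):
--             j += 1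
--         segs.append((False, rest[:j]))
--         if j == n:
--             break
--         q = rest[j]
--         k = j + 1
--         while k < n:
--             if rest[k] == "\\" and k + 1 < n:
--                 k += 2
--             elif rest[k] == q:
--                 k += 1
--                 break
--             else:
--                 k += 1
--         segs.append((True, rest[j:k]))
--         rest = rest[k:]
--     return segs
--
--
-- def _collapse(seg, last):
--     """Collapse runs of spaces/tabs to one space by comparing each char with its
--     predecessor; if this is the line's final segment, drop a trailing space."""
--     ws = " \t"
--     out = "".join(
--         ("" if p in ws else " ") if c in ws else c
--         for p, c in zip("\0" + seg, seg)
--     )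
--     if last and out.endswith(" "):
--         out = out[:-1]
--     return out
--
--
-- def _normalize_line(line):
--     segs = _segments(line)
--     n = len(segs)
--     return "".join(
--         seg if quoted else _collapse(seg, i == n - 1)
--         for i, (quoted, seg) in enumerate(segs)
--     )
-- ===== Notes on version B (the rewrite author's own statement) =====
-- stated objective: alternative
-- what changed: Replaces the single char-by-char state machine (in_space flag interleaved with an inner quote loop) by a two-phase decomposition: each line is first split into alternating unquoted/quoted segments, then each unquoted segment is collapsed locally by comparing every character with its predecessor (quoted segments pass verbatim, the final segment drops one trailing space).
import Mathlib
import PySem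

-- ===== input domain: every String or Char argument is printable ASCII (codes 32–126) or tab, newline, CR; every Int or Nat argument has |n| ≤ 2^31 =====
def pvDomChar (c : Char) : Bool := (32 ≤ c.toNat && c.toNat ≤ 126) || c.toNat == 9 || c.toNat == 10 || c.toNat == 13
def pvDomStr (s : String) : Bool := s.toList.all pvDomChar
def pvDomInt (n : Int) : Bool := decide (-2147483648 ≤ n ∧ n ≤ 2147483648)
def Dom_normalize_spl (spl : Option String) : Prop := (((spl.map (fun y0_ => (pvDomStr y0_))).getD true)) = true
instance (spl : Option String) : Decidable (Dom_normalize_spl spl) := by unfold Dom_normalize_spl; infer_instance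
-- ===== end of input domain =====

-- B replaces A's single char-by-char state machine by a two-phase decomposition
-- (split each line into unquoted/quoted segments, collapse whitespace locally by
-- comparing each char with its predecessor); same behaviour, objective: alternative.


-- ===== PORT A =====
-- inner `while` of `_normalize_line_whitespace` after a quote char was consumed:
-- returns (chars appended verbatim, remaining chars after `i += 1`)
def pvQuoA (q : Char) : List Char → List Char × List Char
  | [] => ([], [])
  | [c] => ([c], [])          -- escape test `i+1 < len` fails; break or loop-end both leave ([c], [])
  | c :: d :: tl =>
    if c = '\\' then
      (c :: d :: (pvQuoA q tl).1, (pvQuoA q tl).2)    -- escaped char: include next char too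
    else if c = q then
      ([c], d :: tl)          -- closing quote: break, then i += 1
    else
      (c :: (pvQuoA q (d :: tl)).1, (pvQuoA q (d :: tl)).2)

theorem pvQuoA_len (q : Char) (l : List Char) : (pvQuoA q l).2.length ≤ l.length := by
  fun_induction pvQuoA q l <;> simp_all <;> omega

-- outer `while` of `_normalize_line_whitespace`, state = (remaining chars, in_space)
def pvNormLineA (l : List Char) (insp : Bool) : List Char :=
  match l with
  | [] => []
  | c :: rest =>
    if c = '"' ∨ c = '\'' then
      (if insp then [' '] else []) ++ c :: ((pvQuoA c rest).1 ++ pvNormLineA (pvQuoA c rest).2 false)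
    else if c = ' ' ∨ c = '\t' then
      pvNormLineA rest true
    else
      (if insp then [' '] else []) ++ c :: pvNormLineA rest false
termination_by l.length
decreasing_by
  · exact Nat.lt_succ_of_le (pvQuoA_len c rest)
  · simp
  · simp

def normalize_spl (spl : Option String) : String :=
  match spl with
  | none => ""                                    -- `if not spl`
  | some s =>
    if s = "" then ""                             -- `if not spl`
    else
      let r := PySem.Str.replace (PySem.Str.replace s "\r\n" "\n") "\r" "\n"
      let r := PySem.Str.strip r
      if r = "" then ""
      else
        let lines := PySem.Chars.splitOn r.toList ['\n']       -- result.split("\n")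
        String.ofList (PySem.Chars.join ['\n'] (lines.map (fun line => pvNormLineA line false)))

-- ===== PORT B =====
def pvWsB (c : Char) : Bool := c == ' ' || c == '\t'           -- `in " \t"`

-- B's `k` loop: scan after an opening quote; returns (quoted body incl. closing quote, rest)
def pvSegScan (q : Char) : List Char → List Char × List Char
  | [] => ([], [])
  | [c] => ([c], [])
  | c :: d :: tl =>
    if c = '\\' then
      (c :: d :: (pvSegScan q tl).1, (pvSegScan q tl).2)
    else if c = q then
      ([c], d :: tl)
    else
      (c :: (pvSegScan q (d :: tl)).1, (pvSegScan q (d :: tl)).2)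

theorem pvSegScan_len (q : Char) (l : List Char) : (pvSegScan q l).2.length ≤ l.length := by
  fun_induction pvSegScan q l <;> simp_all <;> omega

def pvNotQuote (c : Char) : Bool := !(c == '"' || c == '\'')

-- B's `_segments`: alternating (false, unquoted) / (true, quoted-verbatim) segments
def pvSegments (l : List Char) : List (Bool × List Char) :=
  if l = [] then []
  else
    match hr : l.dropWhile pvNotQuote with
    | [] => [(false, l.takeWhile pvNotQuote)]
    | q :: tl =>
      (false, l.takeWhile pvNotQuote)
        :: (true, q :: (pvSegScan q tl).1)
        :: pvSegments (pvSegScan q tl).2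
termination_by l.length
decreasing_by
  have h1 : (q :: tl).length ≤ l.length := by
    rw [← hr]; exact List.length_dropWhile_le _ _
  have h2 := pvSegScan_len q tl
  simp at h1; omega

-- B's `_collapse`: compare each char with its predecessor (zip("\0"+seg, seg));
-- `out.endswith(" ")` / `out[:-1]` are exact on code points as getLast?/dropLast
def pvCollapse (s : List Char) (last : Bool) : List Char :=
  let out := ((List.zip ((Char.ofNat 0) :: s) s).map
      (fun pc => if pvWsB pc.2 then (if pvWsB pc.1 then [] else [' ']) else [pc.2])).flatten
  if last && (out.getLast? == some ' ') then out.dropLast else out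

-- B's `_normalize_line` join: quoted verbatim, unquoted collapsed, `i == n-1` marks the last segment
def pvRenderSegs : List (Bool × List Char) → List Char
  | [] => []
  | [(q, s)] => if q then s else pvCollapse s true
  | (q, s) :: rest => (if q then s else pvCollapse s false) ++ pvRenderSegs rest

def pvNormLineB (l : List Char) : List Char := pvRenderSegs (pvSegments l)

def normalize_spl_alt (spl : Option String) : String :=
  match spl with
  | none => ""
  | some s =>
    if s = "" then ""
    else
      let r := PySem.Str.replace (PySem.Str.replace s "\r\n" "\n") "\r" "\n"
      let r := PySem.Str.strip r
      if r = "" then ""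
      else
        let lines := PySem.Chars.splitOn r.toList ['\n']
        String.ofList (PySem.Chars.join ['\n'] (lines.map (fun line => pvNormLineB line)))

-- ===== PRECONDITION & SPEC =====
def Spec_normalize_spl (spl : Option String) (out : String) : Prop := out = normalize_spl_alt spl
instance (spl : Option String) (out : String) : Decidable (Spec_normalize_spl spl out) := by unfold Spec_normalize_spl; infer_instance

-- ===== CLAIM (what is proved, stated in full; the proofs are below) =====
def Claim_equal_normalize_spl : Prop := ∀ (spl : Option String), Dom_normalize_spl spl → Spec_normalize_spl spl (normalize_spl spl)

-- ===== LEMMAS AND PROOFS =====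

-- The two quote scanners are the same function
theorem pvSegScan_eq (q : Char) (l : List Char) : pvSegScan q l = pvQuoA q l := by
  fun_induction pvSegScan q l <;> simp_all [pvQuoA]

-- A's state machine restricted to a quote-free run: (emitted chars, final in_space)
def pvEmitA : List Char → Bool → List Char × Bool
  | [], b => ([], b)
  | c :: tl, b =>
    if c = ' ' ∨ c = '\t' then pvEmitA tl true
    else
      ((if b then [' '] else []) ++ c :: (pvEmitA tl false).1, (pvEmitA tl false).2)

theorem pvNormLineA_split (u : List Char) (rest : List Char) (b : Bool)
    (h : ∀ c ∈ u, ¬(c = '"' ∨ c = '\'')) :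
    pvNormLineA (u ++ rest) b = (pvEmitA u b).1 ++ pvNormLineA rest (pvEmitA u b).2 := by
  induction u generalizing b with
  | nil => simp [pvEmitA]
  | cons c tl ih =>
    have hc := h c (by simp)
    have htl : ∀ x ∈ tl, ¬(x = '"' ∨ x = '\'') := fun x hx => h x (by simp [hx])
    by_cases hw : c = ' ' ∨ c = '\t'
    · simp only [List.cons_append, pvNormLineA, pvEmitA, if_neg hc, if_pos hw, ih _ htl]
    · simp only [List.cons_append, pvNormLineA, pvEmitA, if_neg hc, if_neg hw, ih _ htl]
      simp

-- B's predecessor comparison as a state machine (state = previous char was whitespace)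
def pvZipOut : List Char → Bool → List Char
  | [], _ => []
  | c :: tl, pws => (if pvWsB c then (if pws then [] else [' ']) else [c]) ++ pvZipOut tl (pvWsB c)

theorem pvZip_flatten (s : List Char) (p : Char) :
    ((List.zip (p :: s) s).map
      (fun pc => if pvWsB pc.2 then (if pvWsB pc.1 then [] else [' ']) else [pc.2])).flatten
    = pvZipOut s (pvWsB p) := by
  induction s generalizing p with
  | nil => rfl
  | cons c tl ih => simp [pvZipOut, ih c]

theorem pvWsB_iff (c : Char) : pvWsB c = true ↔ (c = ' ' ∨ c = '\t') := by
  simp [pvWsB]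

theorem pvEmit_zip (s : List Char) (b : Bool) :
    (pvEmitA s b).1 ++ (if (pvEmitA s b).2 then [' '] else [])
      = (if b then [' '] else []) ++ pvZipOut s b := by
  induction s generalizing b with
  | nil => simp [pvEmitA, pvZipOut]
  | cons c tl ih =>
    by_cases hw : c = ' ' ∨ c = '\t'
    · have hwb : pvWsB c = true := (pvWsB_iff c).2 hw
      simp only [pvEmitA, if_pos hw, pvZipOut, hwb, if_pos, ih true]
      cases b <;> simp
    · have hwb : pvWsB c = false := by
        cases h : pvWsB c
        · rfl
        · exact absurd ((pvWsB_iff c).1 h) hw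
      simp only [pvEmitA, if_neg hw, pvZipOut, hwb]
      simp only [Bool.false_eq_true, if_false]
      have := ih false
      simp only [if_neg (by simp : ¬ (False : Prop)), Bool.false_eq_true, if_false,
        List.nil_append] at this
      simp [this]

theorem pvEmit_no_trail (s : List Char) (b : Bool) :
    (pvEmitA s b).1.getLast? ≠ some ' ' := by
  induction s generalizing b with
  | nil => simp [pvEmitA]
  | cons c tl ih =>
    by_cases hw : c = ' ' ∨ c = '\t'
    · simpa [pvEmitA, if_pos hw] using ih true
    · simp only [pvEmitA, if_neg hw]
      cases hp : (pvEmitA tl false).1 with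
      | nil => cases b <;> simp [hp] <;> intro h <;> exact hw (Or.inl h)
      | cons x xs =>
        have := ih (b := false)
        rw [hp] at this
        cases b <;> simp [hp] <;> simpa using this

-- pvCollapse in terms of A's state machine
theorem pvCollapse_false (u : List Char) :
    pvCollapse u false = (pvEmitA u false).1 ++ (if (pvEmitA u false).2 then [' '] else []) := by
  unfold pvCollapse
  simp only [Bool.false_and, Bool.false_eq_true, if_false]
  rw [pvZip_flatten u (Char.ofNat 0)]
  have h0 : pvWsB (Char.ofNat 0) = false := by decide
  rw [h0]
  have := pvEmit_zip u false
  simpa using this.symm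

theorem pvCollapse_true (u : List Char) :
    pvCollapse u true = (pvEmitA u false).1 := by
  unfold pvCollapse
  rw [pvZip_flatten u (Char.ofNat 0)]
  have h0 : pvWsB (Char.ofNat 0) = false := by decide
  rw [h0]
  have hz : pvZipOut u false = (pvEmitA u false).1 ++ (if (pvEmitA u false).2 then [' '] else []) := by
    have := pvEmit_zip u false
    simpa using this.symm
  rw [hz]
  cases he : (pvEmitA u false).2
  · simp [pvEmit_no_trail u false]
  · simp

theorem pvRender_true_cons (s : List Char) (rest : List (Bool × List Char)) :
    pvRenderSegs ((true, s) :: rest) = s ++ pvRenderSegs rest := by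
  cases rest <;> simp [pvRenderSegs]

theorem pvDropWhile_head (p : Char → Bool) (l : List Char) (c : Char) (tl : List Char)
    (h : l.dropWhile p = c :: tl) : p c = false := by
  induction l with
  | nil => simp at h
  | cons x xs ih =>
    by_cases hx : p x
    · rw [List.dropWhile_cons_of_pos hx] at h; exact ih h
    · rw [List.dropWhile_cons_of_neg hx] at h
      cases h; simpa using hx

theorem pvNormLine_eq_aux : ∀ (n : Nat) (l : List Char), l.length ≤ n →
    pvNormLineA l false = pvNormLineB l := by
  intro n
  induction n with
  | zero =>
    intro l hl
    have : l = [] := List.length_eq_zero_iff.1 (Nat.le_zero.1 hl)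
    subst this
    simp [pvNormLineA, pvNormLineB, pvSegments, pvRenderSegs]
  | succ m ih =>
    intro l hl
    by_cases hnil : l = []
    · subst hnil
      simp [pvNormLineA, pvNormLineB, pvSegments, pvRenderSegs]
    · have hsplit : l.takeWhile pvNotQuote ++ l.dropWhile pvNotQuote = l :=
        List.takeWhile_append_dropWhile
      have hu : ∀ c ∈ l.takeWhile pvNotQuote, ¬(c = '"' ∨ c = '\'') := by
        intro c hc
        have := List.mem_takeWhile_imp hc
        simp [pvNotQuote] at this
        rintro (rfl | rfl) <;> simp_all
      cases hr : l.dropWhile pvNotQuote with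
      | nil =>
        have hA := pvNormLineA_split (l.takeWhile pvNotQuote) [] false hu
        conv_lhs => rw [← hsplit, hr]
        rw [hA]
        rw [pvNormLineB, pvSegments, if_neg hnil, hr]
        simp [pvNormLineA, pvRenderSegs, pvCollapse_true]
      | cons q tl =>
        have hq : pvNotQuote q = false := pvDropWhile_head _ _ _ _ hr
        have hq' : q = '"' ∨ q = '\'' := by
          by_cases h : q = '"'
          · exact Or.inl h
          · refine Or.inr ?_
            simp [pvNotQuote, h] at hq
            exact hq
        -- A side
        have hA : pvNormLineA l false
            = (pvEmitA (l.takeWhile pvNotQuote) false).1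
              ++ (if (pvEmitA (l.takeWhile pvNotQuote) false).2 then [' '] else [])
              ++ q :: ((pvQuoA q tl).1 ++ pvNormLineA (pvQuoA q tl).2 false) := by
          conv_lhs => rw [← hsplit, hr]
          rw [pvNormLineA_split _ _ _ hu]
          rw [pvNormLineA, if_pos hq']
          simp
        -- B side
        have hlen : (pvSegScan q tl).2.length ≤ m := by
          have h1 : (q :: tl).length ≤ l.length := by
            rw [← hr]; exact List.length_dropWhile_le _ _
          have h2 := pvSegScan_len q tl
          simp at h1
          omega
        rw [pvNormLineB, pvSegments, if_neg hnil, hr]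
        rw [show pvRenderSegs ((false, l.takeWhile pvNotQuote)
              :: (true, q :: (pvSegScan q tl).1) :: pvSegments (pvSegScan q tl).2)
            = pvCollapse (l.takeWhile pvNotQuote) false
              ++ pvRenderSegs ((true, q :: (pvSegScan q tl).1) :: pvSegments (pvSegScan q tl).2)
          from by simp [pvRenderSegs]]
        rw [pvRender_true_cons, pvCollapse_false, hA]
        rw [← pvNormLineB, ← ih _ hlen, pvSegScan_eq]
        simp

theorem pvNormLine_eq (l : List Char) : pvNormLineA l false = pvNormLineB l :=
  pvNormLine_eq_aux l.length l (le_refl _)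

-- ===== VERDICT (by name: the statement is the Claim_ definition above) =====
theorem normalize_spl_spec : Claim_equal_normalize_spl := by
  intro spl _
  unfold Spec_normalize_spl normalize_spl normalize_spl_alt
  cases spl with
  | none => rfl
  | some s =>
    by_cases h1 : s = ""
    · simp [h1]
    · simp only [if_neg h1]
      split
      · rfl
      · have : (fun line => pvNormLineA line false) = (fun line => pvNormLineB line) :=
          funext fun l => pvNormLine_eq l
        rw [this]
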